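-- pv_equiv track=rewrite | github.com/sofia-scz/coloq-nuclear-nn | database/processdata.py | valence
-- ===== SOURCE A (Python) =====
-- Ns = [2, 8, 20, 28, 50, 82, 126, 184, 258]
--
-- def valence(n):
--     if n < 5:
--         return n - 2
--     for j, s in enumerate(Ns):
--         S = Ns[j+1]
--         if n < S and n >= s:
--             m = (s+S) // 2
--             if n < m:
--                 return n - s
--             elif n >= m:
--                 return n - S
-- ===== SOURCE B (Python) =====
-- Ns = [2, 8, 20, 28, 50, 82, 126, 184, 258]
--
-- def valence(n):
--     if n < 5:
--         return n - 2
--     # binary search: lo = bisect_right(Ns, n)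
--     lo, hi = 0, len(Ns)
--     while lo < hi:
--         mid = (lo + hi) // 2
--         if n < Ns[mid]:
--             hi = mid
--         else:
--             lo = mid + 1
--     idx = lo - 1
--     s = Ns[idx]
--     S = Ns[idx + 1]   # IndexError for n >= 258, as in the original
--     m = (s + S) // 2
--     return n - s if n < m else n - S
-- ===== Notes on version B (the rewrite author's own statement) =====
-- stated objective: alternative
-- what changed: Replaces the sequential enumerate-scan over shell intervals with a hand-written binary search (bisect_right) that locates the enclosing magic-number interval directly, then applies the same floored-midpoint split.
import Mathlib
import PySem

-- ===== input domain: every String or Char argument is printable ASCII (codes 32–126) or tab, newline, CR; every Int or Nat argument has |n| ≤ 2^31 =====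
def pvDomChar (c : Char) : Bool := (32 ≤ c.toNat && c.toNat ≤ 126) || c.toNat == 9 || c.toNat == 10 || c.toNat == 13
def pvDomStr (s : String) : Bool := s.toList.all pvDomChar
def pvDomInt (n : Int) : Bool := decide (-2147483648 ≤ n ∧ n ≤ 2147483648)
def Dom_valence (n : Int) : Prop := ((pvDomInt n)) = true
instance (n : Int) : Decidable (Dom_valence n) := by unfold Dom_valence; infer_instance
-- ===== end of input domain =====

-- B replaces A's sequential interval scan with a hand-written binary search (bisect_right); same values, same raising inputs.

-- ===== PORT A =====
def NsA : List Int := [2, 8, 20, 28, 50, 82, 126, 184, 258]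

-- the for-loop over enumerate(Ns); `none` = IndexError on Ns[j+1] (or loop exhausted / implicit None)
def valenceGoA (n : Int) : List (Int × Int) → Option Int
  | [] => none
  | (j, s) :: rest =>
    match PySem.List.pyGet? NsA (j + 1) with
    | none => none
    | some S =>
      if n < S ∧ n ≥ s then
        let m := PySem.Int.floordiv (s + S) 2
        if n < m then some (n - s)
        else if n ≥ m then some (n - S)
        else valenceGoA n rest
      else valenceGoA n rest

def valence (n : Int) : Option Int :=
  if n < 5 then some (n - 2) else valenceGoA n (PySem.List.enumerate NsA)

-- ===== PORT B =====
def NsB : List Int := [2, 8, 20, 28, 50, 82, 126, 184, 258]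

-- the while-loop of Source B's hand-written bisect_right; fuel = hi - lo is only a totality guard
def bsrB (n : Int) : Nat → Nat → Nat → Nat
  | 0, lo, _ => lo
  | fuel + 1, lo, hi =>
    if lo < hi then
      let mid := (lo + hi) / 2
      if n < (PySem.List.pyGet? NsB (Int.ofNat mid)).getD 0 then bsrB n fuel lo mid
      else bsrB n fuel (mid + 1) hi
    else lo

def valence_alt (n : Int) : Option Int :=
  if n < 5 then some (n - 2)
  else
    let idx : Int := Int.ofNat (bsrB n NsB.length 0 NsB.length) - 1
    match PySem.List.pyGet? NsB idx with
    | none => none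
    | some s =>
      match PySem.List.pyGet? NsB (idx + 1) with
      | none => none
      | some S =>
        let m := PySem.Int.floordiv (s + S) 2
        if n < m then some (n - s) else some (n - S)

-- ===== PRECONDITION & SPEC =====
-- Pre_ excludes exactly n ≥ 258, where both Pythons raise IndexError (Ns[j+1] / Ns[idx+1] off the end).
def Pre_valence (n : Int) : Prop := n < 258
instance (n : Int) : Decidable (Pre_valence n) := by unfold Pre_valence; infer_instance
def pvWitness_valence : Int := 100

def Spec_valence (n : Int) (out : Option Int) : Prop := out = valence_alt n
instance (n : Int) (out : Option Int) : Decidable (Spec_valence n out) := by unfold Spec_valence; infer_instance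

-- ===== CLAIM (what is proved, stated in full; the proofs are below) =====
def Claim_equal_valence : Prop := ∀ (n : Int), Dom_valence n → Pre_valence n → Spec_valence n (valence n)

-- ===== LEMMAS AND PROOFS =====

-- ===== VERDICT (by name: the statement is the Claim_ definition above) =====
theorem valence_spec : Claim_equal_valence := by
  intro n _ hpre
  unfold Spec_valence
  by_cases h5 : n < 5
  · simp [valence, valence_alt, h5]
  · have h1 : 5 ≤ n := by omega
    have h2 : n < 258 := hpre
    interval_cases n <;> decide
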